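-- pv_equiv track=rewrite | github.com/yyysolhhh/PS_study | 백준/Bronze/27494. 2023년은 검은 토끼의 해/2023년은 검은 토끼의 해.py | func
-- ===== SOURCE A (Python) =====
-- def func(n):
--     if n < 2023:
--         return 0
--
--     target = '2023'
--     cnt = 0
--
--     for i in range(2023, n+1):
--         idx = 0
--         for j in str(i):
--             if j == target[idx]:
--                 idx += 1
--                 if idx == 4:
--                     cnt += 1
--                     break
--     return cnt
-- ===== SOURCE B (Python) =====
-- def func(n):
--     # Arithmetic re-implementation: extract decimal digits of each i with % / //
--     # (least-significant first) and greedily match '2023' backwards; no string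
--     # conversion, no early break, empty range handles n < 2023.
--     need = (3, 2, 0, 2)  # digits of 2023, last first
--     total = 0
--     for i in range(2023, n + 1):
--         k = 0
--         m = i
--         while m > 0:
--             if k < 4 and m % 10 == need[k]:
--                 k += 1
--             m //= 10
--         if k == 4:
--             total += 1
--     return total
-- ===== Notes on version B (the rewrite author's own statement) =====
-- stated objective: alternative
-- what changed: B drops the string conversion and the stateful left-to-right scan with break: it extracts each number's decimal digits arithmetically (% 10, // 10, least-significant first) and greedily matches the digits of 2023 backwards with a counter; the n < 2023 guard disappears because the empty range handles it.
import Mathlib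
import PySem

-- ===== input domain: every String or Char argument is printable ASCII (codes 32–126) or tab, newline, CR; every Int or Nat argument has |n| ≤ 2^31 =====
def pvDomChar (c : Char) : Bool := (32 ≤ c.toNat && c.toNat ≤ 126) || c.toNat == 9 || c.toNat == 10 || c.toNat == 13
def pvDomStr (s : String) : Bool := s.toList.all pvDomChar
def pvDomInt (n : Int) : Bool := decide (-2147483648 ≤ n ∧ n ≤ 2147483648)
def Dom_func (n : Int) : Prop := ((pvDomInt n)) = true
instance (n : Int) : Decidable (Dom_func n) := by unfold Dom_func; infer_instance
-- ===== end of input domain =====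

-- B replaces A's string scan of each number by arithmetic digit extraction (% 10, // 10)
-- matching '2023' backwards; alternative decomposition, same asymptotic cost.

-- ===== PORT A =====
-- target = '2023'
def pvTgt : List Char := ['2', '0', '2', '3']

-- inner loop of A: scan the decimal string left to right, greedily advancing idx,
-- return true exactly when idx reaches 4 (the 'cnt += 1; break' case)
def pvScanA : List Char → Nat → Bool
  | [], _ => false
  | j :: rest, idx =>
    if j = pvTgt.getD idx ' ' then
      (if idx + 1 = 4 then true else pvScanA rest (idx + 1))
    else pvScanA rest idx

def func (n : Int) : Int :=
  if n < 2023 then 0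
  else
    (PySem.List.pyRange 2023 (n + 1) 1).foldl
      (fun cnt i => if pvScanA (PySem.Int.toChars i) 0 then cnt + 1 else cnt) 0

-- ===== PORT B =====
-- need = (3, 2, 0, 2): digits of 2023, last first
def pvNeed : List Int := [3, 2, 0, 2]

-- inner while loop of B: strip digits with % 10 and // 10, counting matches of need
def pvScanB (m : Int) (k : Nat) : Nat :=
  if h : 0 < m then
    pvScanB (PySem.Int.floordiv m 10)
      (if k < 4 ∧ PySem.Int.mod m 10 = pvNeed.getD k (-1) then k + 1 else k)
  else k
termination_by m.toNat
decreasing_by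
  have hmn : m = (m.toNat : Int) := by omega
  rw [hmn, show ((10 : Int)) = ((10 : Nat) : Int) from rfl, PySem.Int.floordiv_natCast]
  have := Nat.div_lt_self (by omega : 0 < m.toNat) (by norm_num : 1 < 10)
  simp
  omega

def func_alt (n : Int) : Int :=
  (PySem.List.pyRange 2023 (n + 1) 1).foldl
    (fun total i => if pvScanB i 0 = 4 then total + 1 else total) 0

-- ===== PRECONDITION & SPEC =====
def Spec_func (n : Int) (out : Int) : Prop := out = func_alt n
instance (n : Int) (out : Int) : Decidable (Spec_func n out) := by unfold Spec_func; infer_instance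

-- ===== CLAIM (what is proved, stated in full; the proofs are below) =====
def Claim_equal_func : Prop := ∀ (n : Int), Dom_func n → Spec_func n (func n)

-- ===== LEMMAS AND PROOFS =====

-- little-endian decimal digits of a natural number (proof-side spec object)
def pvDigits (n : Nat) : List Nat :=
  if n = 0 then [] else n % 10 :: pvDigits (n / 10)
decreasing_by exact Nat.div_lt_self (by omega) (by norm_num)

lemma pvDigits_zero : pvDigits 0 = [] := by rw [pvDigits]; rfl

lemma pvDigits_pos {n : Nat} (h : n ≠ 0) : pvDigits n = n % 10 :: pvDigits (n / 10) := by
  rw [pvDigits, if_neg h]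

lemma pvDigits_lt (n : Nat) : ∀ d ∈ pvDigits n, d < 10 := by
  induction n using Nat.strong_induction_on with
  | _ n ih =>
    intro d hd
    by_cases h : n = 0
    · rw [h, pvDigits_zero] at hd; simp at hd
    · rw [pvDigits_pos h] at hd
      rcases List.mem_cons.mp hd with rfl | hd
      · exact Nat.mod_lt _ (by norm_num)
      · exact ih (n / 10) (Nat.div_lt_self (by omega) (by norm_num)) d hd

-- head-mismatch step of greedy matching
lemma pvSublist_cons_ne {α : Type} {a c : α} (h : a ≠ c) {p l : List α} :
    List.Sublist (a :: p) (c :: l) ↔ List.Sublist (a :: p) l := by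
  constructor
  · intro hs
    cases hs with
    | cons _ hs => exact hs
    | cons₂ _ hs => exact absurd rfl h
  · intro hs; exact hs.cons c

-- core's toDigitsCore produces exactly the reversed digitChar image of pvDigits
lemma pvToDigitsCore_eq : ∀ (fuel n : Nat), 0 < n → n ≤ fuel → ∀ acc,
    Nat.toDigitsCore 10 fuel n acc = ((pvDigits n).map Nat.digitChar).reverse ++ acc := by
  intro fuel
  induction fuel with
  | zero => intro n h1 h2; omega
  | succ fuel ih =>
    intro n h1 h2 acc
    have hn0 : n ≠ 0 := by omega
    simp only [Nat.toDigitsCore]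
    by_cases hz : n / 10 = 0
    · rw [if_pos hz, pvDigits_pos hn0, hz, pvDigits_zero]
      simp
    · rw [if_neg hz, ih (n / 10) (Nat.pos_of_ne_zero hz)
        (by have := Nat.div_lt_self h1 (by norm_num : 1 < 10); omega),
        pvDigits_pos hn0]
      simp

lemma pvToChars_eq (i : Int) (hi : 0 < i) :
    PySem.Int.toChars i = ((pvDigits i.toNat).map Nat.digitChar).reverse := by
  have hnn : ¬ i < 0 := by omega
  simp only [PySem.Int.toChars, hnn, if_false, Nat.toDigits]
  rw [pvToDigitsCore_eq (i.toNat + 1) i.toNat (by omega) (by omega)]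
  simp

-- A's scan reaches 4 from state idx exactly when the remaining target is a sublist
lemma pvScanA_iff : ∀ (l : List Char) (idx : Nat), idx < 4 →
    (pvScanA l idx = true ↔ List.Sublist (pvTgt.drop idx) l) := by
  intro l
  induction l with
  | nil =>
    intro idx h
    simp only [pvScanA, Bool.false_eq_true, false_iff]
    intro hs
    have := List.eq_nil_of_sublist_nil hs
    interval_cases idx <;> exact absurd this (by decide)
  | cons c cs ih =>
    intro idx h
    have hdrop : pvTgt.drop idx = pvTgt.getD idx ' ' :: pvTgt.drop (idx + 1) := by
      interval_cases idx <;> rfl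
    simp only [pvScanA]
    by_cases hc : c = pvTgt.getD idx ' '
    · rw [if_pos hc]
      by_cases h4 : idx + 1 = 4
      · have hidx : idx = 3 := by omega
        subst hidx
        rw [if_pos h4]
        simp only [true_iff]
        rw [hdrop, hc]
        rw [show pvTgt.drop (3 + 1) = [] from rfl]
        exact List.cons_sublist_cons.mpr (List.nil_sublist _)
      · rw [if_neg h4, ih (idx + 1) (by omega), hdrop, hc, List.cons_sublist_cons]
    · rw [if_neg hc, ih idx h, hdrop]
      exact (pvSublist_cons_ne (fun he => hc he.symm)).symm

-- list form of B's digit loop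
def pvScanL : List Nat → Nat → Nat
  | [], k => k
  | d :: ds, k =>
    pvScanL ds (if k < 4 ∧ (d : Int) = pvNeed.getD k (-1) then k + 1 else k)

lemma pvScanB_eq_scanL : ∀ (N : Nat) (m : Int), m.toNat ≤ N → ∀ k,
    pvScanB m k = pvScanL (pvDigits m.toNat) k := by
  intro N
  induction N with
  | zero =>
    intro m hm k
    have h0 : ¬ 0 < m := by omega
    rw [pvScanB, dif_neg h0, show m.toNat = 0 by omega, pvDigits_zero]
    rfl
  | succ N ih =>
    intro m hm k
    by_cases h : 0 < m
    · have hmn : m = (m.toNat : Int) := by omega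
      have hmod : PySem.Int.mod m 10 = ((m.toNat % 10 : Nat) : Int) := by
        rw [hmn]; exact PySem.Int.mod_natCast m.toNat 10
      have hdiv : PySem.Int.floordiv m 10 = ((m.toNat / 10 : Nat) : Int) := by
        rw [hmn]; exact PySem.Int.floordiv_natCast m.toNat 10
      have hnz : m.toNat ≠ 0 := by omega
      rw [pvScanB, dif_pos h, hmod, hdiv, pvDigits_pos hnz]
      simp only [pvScanL]
      rw [ih ((m.toNat / 10 : Nat) : Int)
        (by have := Nat.div_lt_self (by omega : 0 < m.toNat) (by norm_num : 1 < 10); simp; omega)]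
      rw [Int.toNat_natCast]
    · rw [pvScanB, dif_neg h, show m.toNat = 0 by omega, pvDigits_zero]
      rfl

-- the numeric condition of B agrees with the character condition of A's target
lemma pvCond_iff (d k : Nat) (hd : d < 10) (hk : k < 4) :
    ((d : Int) = pvNeed.getD k (-1)) ↔ (Nat.digitChar d = pvTgt.reverse.getD k ' ') := by
  interval_cases k <;> interval_cases d <;> decide

-- B's digit loop reaches 4 exactly when the reversed target is a sublist of the digit chars
lemma pvScanL_iff : ∀ (ds : List Nat) (k : Nat), k ≤ 4 → (∀ d ∈ ds, d < 10) →
    (pvScanL ds k = 4 ↔ List.Sublist (pvTgt.reverse.drop k) (ds.map Nat.digitChar)) := by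
  intro ds
  induction ds with
  | nil =>
    intro k hk _
    simp only [pvScanL, List.map_nil]
    constructor
    · intro h; subst h; decide
    · intro hs
      have := List.eq_nil_of_sublist_nil hs
      interval_cases k <;> first | rfl | exact absurd this (by decide)
  | cons d ds ih =>
    intro k hk hlt
    have hd : d < 10 := hlt d List.mem_cons_self
    have hlt' : ∀ x ∈ ds, x < 10 := fun x hx => hlt x (List.mem_cons_of_mem _ hx)
    simp only [pvScanL, List.map_cons]
    by_cases h4 : k = 4
    · subst h4
      rw [if_neg (fun hh => absurd hh.1 (by omega)), ih 4 le_rfl hlt',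
        show pvTgt.reverse.drop 4 = [] from rfl]
      simp [List.nil_sublist]
    · have hk4 : k < 4 := by omega
      have hdrop : pvTgt.reverse.drop k = pvTgt.reverse.getD k ' ' :: pvTgt.reverse.drop (k + 1) := by
        interval_cases k <;> rfl
      by_cases hc : (d : Int) = pvNeed.getD k (-1)
      · rw [if_pos ⟨hk4, hc⟩, ih (k + 1) (by omega) hlt', hdrop,
          show pvTgt.reverse.getD k ' ' = Nat.digitChar d from ((pvCond_iff d k hd hk4).mp hc).symm,
          List.cons_sublist_cons]
      · rw [if_neg (fun hh => hc hh.2), ih k hk hlt', hdrop]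
        exact (pvSublist_cons_ne
          (fun he => hc ((pvCond_iff d k hd hk4).mpr he.symm))).symm

-- per-number agreement of the two inner loops
lemma pvInner_iff (i : Int) (hi : 2023 ≤ i) :
    (pvScanA (PySem.Int.toChars i) 0 = true) ↔ (pvScanB i 0 = 4) := by
  rw [pvScanA_iff _ 0 (by omega), pvToChars_eq i (by omega),
    pvScanB_eq_scanL i.toNat i le_rfl 0,
    pvScanL_iff (pvDigits i.toNat) 0 (by omega) (pvDigits_lt i.toNat)]
  simp only [List.drop_zero]
  exact List.sublist_reverse_iff

-- ===== VERDICT (by name: the statement is the Claim_ definition above) =====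
theorem func_spec : Claim_equal_func := by
  intro n _
  unfold Spec_func func func_alt
  by_cases h : n < 2023
  · rw [if_pos h, PySem.List.pyRange_one_eq_nil (by omega)]
    rfl
  · rw [if_neg h]
    apply PySem.List.foldl_congr_mem
    intro acc i hi
    have hmem := PySem.List.mem_pyRange_one.mp hi
    simp only [pvInner_iff i (by omega)]
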